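-- pv_equiv track=rewrite | github.com/YangxGeon/CodingTest | 2024.09/2024.09.08/PCCE5.py | solution
-- ===== SOURCE A (Python) =====
-- def solution(route):
--     east = 0
--     north = 0
--     for i in route:
--         if i == "N":
--             north += 1
--         elif i == "S":
--             north -= 1
--         elif i == "E":
--             east += 1
--         elif i == "W":
--             east -= 1
--     return [east, north]
-- ===== SOURCE B (Python) =====
-- def solution(route):
--     return [route.count("E") - route.count("W"),
--             route.count("N") - route.count("S")]
-- ===== Notes on version B (the rewrite author's own statement) =====
-- stated objective: idiomatic
-- what changed: Replaces the single accumulating if/elif loop with per-direction counting: each axis is computed as a difference of two list.count scans, no explicit state.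
import Mathlib
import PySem

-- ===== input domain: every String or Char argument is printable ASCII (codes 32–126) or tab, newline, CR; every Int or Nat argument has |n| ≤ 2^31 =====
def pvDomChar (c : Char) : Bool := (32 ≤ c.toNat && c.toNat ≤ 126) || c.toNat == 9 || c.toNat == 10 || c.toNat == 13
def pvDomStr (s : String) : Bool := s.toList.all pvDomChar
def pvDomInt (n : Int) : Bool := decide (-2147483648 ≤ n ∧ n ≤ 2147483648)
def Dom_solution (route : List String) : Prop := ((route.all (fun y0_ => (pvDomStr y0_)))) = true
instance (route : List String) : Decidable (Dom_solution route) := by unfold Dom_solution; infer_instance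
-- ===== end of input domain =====

-- B replaces the accumulating if/elif loop with per-direction count differences (idiomatic, same cost).
-- ===== PORT A =====
def solution (route : List String) : List Int :=
  let p := route.foldl (fun (st : Int × Int) i =>
    if i == "N" then (st.1, st.2 + 1)
    else if i == "S" then (st.1, st.2 - 1)
    else if i == "E" then (st.1 + 1, st.2)
    else if i == "W" then (st.1 - 1, st.2)
    else st) (0, 0)
  [p.1, p.2]

-- ===== PORT B =====
def solution_alt (route : List String) : List Int :=
  [(PySem.List.count route "E" : Int) - (PySem.List.count route "W" : Int),
   (PySem.List.count route "N" : Int) - (PySem.List.count route "S" : Int)]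

-- ===== PRECONDITION & SPEC =====
def Spec_solution (route : List String) (out : List Int) : Prop := out = solution_alt route
instance (route : List String) (out : List Int) : Decidable (Spec_solution route out) := by unfold Spec_solution; infer_instance

-- ===== CLAIM (what is proved, stated in full; the proofs are below) =====
def Claim_equal_solution : Prop := ∀ (route : List String), Dom_solution route → Spec_solution route (solution route)

-- ===== LEMMAS AND PROOFS =====

-- ===== VERDICT (by name: the statement is the Claim_ definition above) =====
lemma solution_fold (route : List String) (e n : Int) :
    route.foldl (fun (st : Int × Int) i =>
      if i == "N" then (st.1, st.2 + 1)
      else if i == "S" then (st.1, st.2 - 1)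
      else if i == "E" then (st.1 + 1, st.2)
      else if i == "W" then (st.1 - 1, st.2)
      else st) (e, n)
    = (e + (route.count "E" : Int) - (route.count "W" : Int),
       n + (route.count "N" : Int) - (route.count "S" : Int)) := by
  induction route generalizing e n with
  | nil => simp
  | cons x xs ih =>
    simp only [List.foldl_cons, List.count_cons]
    by_cases hN : x = "N" <;> by_cases hS : x = "S" <;> by_cases hE : x = "E" <;> by_cases hW : x = "W" <;>
      simp_all <;> omega

theorem solution_spec : Claim_equal_solution := by
  intro route _
  unfold Spec_solution solution solution_alt
  rw [solution_fold]
  simp [PySem.List.count]
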